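-- pv_equiv track=rewrite | github.com/tgerez/Advent-of-code | 2015/day_05/day_05_part_2.py | check_repeating_letters
-- ===== SOURCE A (Python) =====
-- def check_repeating_letters(l): # repeating letters with exactly one letter between them
--     result = []
--     for s in l: # for each string in list
--         ok = False
--         for i in range(len(s)-2):
--             if s[i] == s[i+2]:
--                 ok = True
--         if ok:
--             result.append(s)
--     return result
-- ===== SOURCE B (Python) =====
-- def check_repeating_letters(l): # repeating letters with exactly one letter between them
--     # Different strategy: index each string's characters by position (char -> set of
--     # positions), then keep the string iff some character occurs at two positions
--     # exactly 2 apart.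
--     result = []
--     for s in l:
--         positions = {}
--         for i, c in enumerate(s):
--             positions.setdefault(c, set()).add(i)
--         if any(i + 2 in ps for ps in positions.values() for i in ps):
--             result.append(s)
--     return result
-- ===== Notes on version B (the rewrite author's own statement) =====
-- stated objective: alternative
-- what changed: Instead of scanning indices comparing s[i] with s[i+2], B builds a per-string hash index mapping each character to the set of positions where it occurs, then keeps the string iff some character's position set contains two positions exactly 2 apart.
import Mathlib
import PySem

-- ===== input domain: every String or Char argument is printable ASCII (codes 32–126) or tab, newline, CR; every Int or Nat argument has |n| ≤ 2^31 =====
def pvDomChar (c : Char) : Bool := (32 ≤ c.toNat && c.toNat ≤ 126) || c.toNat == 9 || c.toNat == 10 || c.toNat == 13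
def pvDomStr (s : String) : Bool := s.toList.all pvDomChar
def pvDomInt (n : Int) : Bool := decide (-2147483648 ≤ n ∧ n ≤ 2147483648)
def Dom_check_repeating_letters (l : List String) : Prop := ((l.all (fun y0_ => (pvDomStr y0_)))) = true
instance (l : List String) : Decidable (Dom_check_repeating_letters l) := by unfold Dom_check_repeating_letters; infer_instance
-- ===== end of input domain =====

-- B replaces A's two-apart index scan by a per-string position index (char -> set of positions)
-- queried for two positions of the same character exactly 2 apart; same result, alternative algorithm.

-- ===== PORT A =====
def check_repeating_letters (l : List String) : List String :=
  l.foldl (fun result s =>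
    let ok := (PySem.List.pyRange 0 ((PySem.Str.len s) - 2) 1).foldl
      (fun ok i => if PySem.Str.pyGet? s i == PySem.Str.pyGet? s (i + 2) then true else ok) false
    if ok then result ++ [s] else result) []

-- ===== PORT B =====
-- positions.setdefault(c, set()).add(i) mutates the set stored at c:
-- positions[c] = positions.get(c, set()) ∪ {i}, i.e. Dict.modify with Set.add.
def check_repeating_letters_alt (l : List String) : List String :=
  l.foldl (fun result s =>
    let positions : PySem.Dict Char (PySem.Set Int) :=
      (PySem.List.enumerate s.toList).foldl
        (fun d p => d.modify p.2 PySem.Set.empty (fun ps => PySem.Set.add ps p.1)) PySem.Dict.empty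
    if positions.values.any (fun ps => ps.any (fun i => PySem.Set.contains ps (i + 2)))
    then result ++ [s] else result) []

-- ===== PRECONDITION & SPEC =====
def Spec_check_repeating_letters (l : List String) (out : List String) : Prop := out = check_repeating_letters_alt l
instance (l : List String) (out : List String) : Decidable (Spec_check_repeating_letters l out) := by unfold Spec_check_repeating_letters; infer_instance

-- ===== CLAIM (what is proved, stated in full; the proofs are below) =====
def Claim_equal_check_repeating_letters : Prop := ∀ (l : List String), Dom_check_repeating_letters l → Spec_check_repeating_letters l (check_repeating_letters l)

-- ===== LEMMAS AND PROOFS =====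

-- membership in the position set stored at c after the grouping loop
theorem getD_pos_loop (l : List (Int × Char)) (d : PySem.Dict Char (PySem.Set Int))
    (c : Char) (i : Int) :
    (i ∈ (l.foldl (fun d p => d.modify p.2 PySem.Set.empty (fun ps => PySem.Set.add ps p.1)) d).getD c PySem.Set.empty)
    ↔ (i ∈ d.getD c PySem.Set.empty ∨ (i, c) ∈ l) := by
  induction l generalizing d with
  | nil => simp
  | cons p t ih =>
    simp only [List.foldl_cons, ih, PySem.Dict.getD_modify, List.mem_cons]
    by_cases h : c = p.2
    · subst h
      rw [if_pos rfl]
      simp only [PySem.Set.mem_add]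
      constructor
      · rintro ((h' | h') | h')
        · tauto
        · exact Or.inr (Or.inl (by cases p; simp_all))
        · tauto
      · rintro (h' | h' | h')
        · tauto
        · exact Or.inl (Or.inr (congrArg Prod.fst h'))
        · tauto
    · rw [if_neg h]
      constructor
      · rintro (h' | h') <;> tauto
      · rintro (h' | h' | h')
        · tauto
        · exact absurd (congrArg Prod.snd h') h
        · tauto

-- the per-string tests of A and B agree
theorem per_string_eq (s : String) :
    ((PySem.List.pyRange 0 ((PySem.Str.len s) - 2) 1).foldl
      (fun ok i => if PySem.Str.pyGet? s i == PySem.Str.pyGet? s (i + 2) then true else ok) false)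
    = (((PySem.List.enumerate s.toList).foldl
        (fun d p => d.modify p.2 PySem.Set.empty (fun ps => PySem.Set.add ps p.1)) PySem.Dict.empty).values.any
        (fun ps => ps.any (fun i => PySem.Set.contains ps (i + 2)))) := by
  rw [PySem.List.foldl_if_true_eq, Bool.false_or]
  set D := ((PySem.List.enumerate s.toList).foldl
      (fun d p => d.modify p.2 PySem.Set.empty (fun ps => PySem.Set.add ps p.1)) PySem.Dict.empty)
    with hD
  have hnd : D.keys.Nodup := by
    rw [hD]
    exact PySem.Dict.nodup_keys_foldl_modify_key _ _ _ _ _ PySem.Dict.nodup_keys_empty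
  have hkeys : ∀ c : Char, c ∈ D.keys ↔ c ∈ s.toList := by
    intro c
    rw [hD, PySem.Dict.keys_foldl_modify_key, PySem.Set.mem_update, PySem.List.map_snd_enumerate]
    simp [PySem.Dict.keys_empty]
  have hmem : ∀ (c : Char) (i : Int),
      i ∈ D.getD c PySem.Set.empty ↔
        ∃ (k : Nat) (h : k < s.toList.length), i = (k : Int) ∧ c = s.toList[k] := by
    intro c i
    rw [hD, getD_pos_loop, PySem.List.mem_enumerate_iff]
    simp [PySem.Dict.getD_empty, Prod.ext_iff]
  rw [PySem.Dict.values_eq_map_keys D hnd PySem.Set.empty, List.any_map, Bool.eq_iff_iff]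
  simp only [List.any_eq_true, Function.comp]
  have hlen : (PySem.Str.len s) = (s.toList.length : Int) := PySem.Str.len_eq s
  constructor
  · rintro ⟨i, hi, hbeq⟩
    rw [PySem.List.mem_pyRange_one] at hi
    obtain ⟨k, rfl⟩ : ∃ k : Nat, i = (k : Int) := ⟨i.toNat, by omega⟩
    have hk' : k + 2 < s.toList.length := by omega
    have hk0 : k < s.toList.length := by omega
    rw [PySem.Str.pyGet?_natCast, List.getElem?_eq_getElem hk0,
      show (k : Int) + 2 = ((k + 2 : Nat) : Int) from by omega,
      PySem.Str.pyGet?_natCast, List.getElem?_eq_getElem hk'] at hbeq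
    have heq : s.toList[k] = s.toList[k + 2] := by simpa using hbeq
    refine ⟨s.toList[k], (hkeys _).mpr (List.getElem_mem hk0), (k : Int), ?_, ?_⟩
    · exact (hmem _ _).mpr ⟨k, hk0, rfl, rfl⟩
    · rw [PySem.Set.contains_iff]
      exact (hmem _ _).mpr ⟨k + 2, hk', by omega, heq⟩
  · rintro ⟨c, hc, i, hi, hcont⟩
    rw [PySem.Set.contains_iff] at hcont
    obtain ⟨k, hk, rfl, hck⟩ := (hmem _ _).mp hi
    obtain ⟨k', hk'', hkk, hck'⟩ := (hmem _ _).mp hcont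
    have hkeq : k' = k + 2 := by omega
    subst hkeq
    refine ⟨(k : Int), ?_, ?_⟩
    · rw [PySem.List.mem_pyRange_one]; omega
    · rw [PySem.Str.pyGet?_natCast, List.getElem?_eq_getElem hk,
        show (k : Int) + 2 = ((k + 2 : Nat) : Int) from by omega,
        PySem.Str.pyGet?_natCast, List.getElem?_eq_getElem hk'']
      simp [← hck, ← hck']

-- ===== VERDICT (by name: the statement is the Claim_ definition above) =====
theorem check_repeating_letters_spec : Claim_equal_check_repeating_letters := by
  intro l _
  unfold Spec_check_repeating_letters check_repeating_letters check_repeating_letters_alt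
  simp only [per_string_eq]
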